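-- pv_equiv track=rewrite | github.com/Pongchi/TIL | CodingTest/PROGRAMMERS/기능개발.py | solution
-- ===== SOURCE A (Python) =====
-- def solution(progresses, speeds):
--     release_date = [ (100 - progresses[i]) // speeds[i] if ((100 - progresses[i]) / speeds[i]) % 1 == 0 else int((100 - progresses[i]) / speeds[i])+1 for i in range(len(progresses)) ]
--     today = 1
--     func = 0
--     answer = []
--
--     while len(release_date) > func:
--
--         if release_date[func] > today:
--             today += 1; continue
--
--         current_func = func
--         for i in range(func, len(release_date)):
--             if release_date[i] <= today:
--                 func += 1; continue
--             else:
--                 answer.append(i - current_func)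
--                 break
--
--     return answer
-- ===== SOURCE B (Python) =====
-- def solution(progresses, speeds):
--     release_date = [ (100 - progresses[i]) // speeds[i] if ((100 - progresses[i]) / speeds[i]) % 1 == 0 else int((100 - progresses[i]) / speeds[i])+1 for i in range(len(progresses)) ]
--     answer = []
--     threshold = None   # deploy day of the current group (at least day 1)
--     count = 0
--     for d in release_date:
--         if threshold is None:
--             threshold = max(1, d)
--             count = 1
--         elif d <= threshold:
--             count += 1
--         else:
--             answer.append(count)
--             threshold = d
--             count = 1
--     return answer
-- ===== Notes on version B (the rewrite author's own statement) =====
-- stated objective: simpler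
-- what changed: Replaced A's day-by-day `today` counter plus index-based inner rescan of the while loop by a single forward pass over release_date that keeps the current group's deploy day (threshold) and a running count, appending the count when a later task exceeds the threshold (the final group is never appended, exactly as in A).
import Mathlib
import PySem

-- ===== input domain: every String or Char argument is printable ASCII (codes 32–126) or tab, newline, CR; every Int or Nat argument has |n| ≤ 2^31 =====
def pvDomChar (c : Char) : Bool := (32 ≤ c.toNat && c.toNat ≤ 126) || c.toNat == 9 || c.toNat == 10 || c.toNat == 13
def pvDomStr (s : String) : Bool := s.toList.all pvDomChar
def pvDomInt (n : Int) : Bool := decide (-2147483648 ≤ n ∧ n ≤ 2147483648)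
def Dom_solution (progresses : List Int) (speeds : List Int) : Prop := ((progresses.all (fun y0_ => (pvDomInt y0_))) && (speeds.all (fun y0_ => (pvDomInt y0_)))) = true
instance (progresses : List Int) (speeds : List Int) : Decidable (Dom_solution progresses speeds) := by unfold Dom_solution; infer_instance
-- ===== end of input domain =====

-- B is a simpler single forward pass (threshold + running count) replacing A's
-- day-by-day `today` counter and index-based inner scan; same return value on Pre_.

-- ===== PORT A =====
-- Shared helper: the release_date comprehension (identical text in Source A and Source B).
-- The Python float test `((100-p)/s) % 1 == 0` and `int((100-p)/s)+1` are exact for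
-- |100-p| < 2^53 (the quotient's distance to an integer exceeds the float rounding
-- error), so on Dom they equal the integer divisibility test and the truncating
-- division `Int.tdiv` used here.
def releaseDate (progresses : List Int) (speeds : List Int) : List Int :=
  (PySem.List.pyRange 0 progresses.length 1).map (fun i =>
    let a : Int := 100 - (PySem.List.pyGet? progresses i).getD 0
    let s : Int := (PySem.List.pyGet? speeds i).getD 0
    if PySem.Int.mod a s = 0 then PySem.Int.floordiv a s else a.tdiv s + 1)

-- A's `if release_date[func] > today: today += 1; continue` branch of the while
-- loop: day-by-day increments of `today` until release_date[func] no longer exceeds it.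
def climbA (r : Int) (today : Int) : Int :=
  if r > today then climbA r (today + 1) else today
termination_by (r - today).toNat


-- A's inner `for i in range(func, len(release_date))` loop: counts `func` up while
-- release_date[i] <= today; at the first larger element returns (func, some (i - current_func)).
def innerA (rd : List Int) (today : Int) (cur : Nat) (i : Nat) (func : Nat) : Nat × Option Int :=
  if i < rd.length then
    if rd.getD i 0 ≤ today then innerA rd today cur (i + 1) (func + 1)
    else (func, some ((i : Int) - (cur : Int)))
  else (func, none)
termination_by rd.length - i

-- one iteration of A's while-loop body (from the top of the loop to the next re-check):
-- `today += 1; continue` while release_date[func] > today, then the inner for-loop,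
-- which advanced func to r.1 and, on break, appended r.2 to answer.
def stepA (rd : List Int) (today : Int) (func : Nat) (answer : List Int) :
    Int × Nat × List Int :=
  let t := climbA (rd.getD func 0) today
  let r := innerA rd t func func func
  (t, r.1, match r.2 with | none => answer | some x => answer ++ [x])


-- A's outer while loop, state (today, func, answer).
def loopA (rd : List Int) (today : Int) (func : Nat) (answer : List Int) : List Int :=
  if h : func < rd.length then
    let s := stepA rd today func answer
    -- the `func < s.2.1` guard only justifies termination: the inner loop always
    -- advances func (stepA_fst_gt below), so the else branch is dead
    if h2 : func < s.2.1 then loopA rd s.1 s.2.1 s.2.2 else s.2.2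
  else answer
termination_by rd.length - func
decreasing_by
  exact Nat.sub_lt_sub_left h h2

def solution (progresses : List Int) (speeds : List Int) : List Int :=
  loopA (releaseDate progresses speeds) 1 0 []

-- ===== PORT B =====
-- B's single pass: threshold = deploy day of the current group (none before the first
-- element), count = size of the current group; the last group is never appended (as in A).
def loopB (answer : List Int) (threshold : Option Int) (count : Int) : List Int → List Int
  | [] => answer
  | d :: rest =>
    match threshold with
    | none => loopB answer (some (max 1 d)) 1 rest
    | some t =>
      if d ≤ t then loopB answer (some t) (count + 1) rest
      else loopB (answer ++ [count]) (some d) 1 rest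

def solution_alt (progresses : List Int) (speeds : List Int) : List Int :=
  loopB [] none 0 (releaseDate progresses speeds)

-- ===== PRECONDITION & SPEC =====
-- Pre_ excludes exactly the inputs on which Python A raises: an index i < len(progresses)
-- with speeds[i] missing (IndexError) or speeds[i] == 0 (ZeroDivisionError).
def Pre_solution (progresses : List Int) (speeds : List Int) : Prop :=
  progresses.length ≤ speeds.length ∧ ∀ i : Nat, i < progresses.length → speeds.getD i 0 ≠ 0
instance (progresses : List Int) (speeds : List Int) : Decidable (Pre_solution progresses speeds) := by
  unfold Pre_solution; infer_instance

def pvWitness_solution : List Int × List Int := ([30, 99, 5], [1, 1, 10])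

def Spec_solution (progresses : List Int) (speeds : List Int) (out : List Int) : Prop := out = solution_alt progresses speeds
instance (progresses : List Int) (speeds : List Int) (out : List Int) : Decidable (Spec_solution progresses speeds out) := by unfold Spec_solution; infer_instance

-- ===== CLAIM (what is proved, stated in full; the proofs are below) =====
def Claim_equal_solution : Prop := ∀ (progresses : List Int) (speeds : List Int), Dom_solution progresses speeds → Pre_solution progresses speeds → Spec_solution progresses speeds (solution progresses speeds)

-- ===== LEMMAS AND PROOFS =====

theorem climbA_ge (r : Int) : ∀ today, r ≤ climbA r today := by
  intro today
  induction today using climbA.induct r with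
  | case1 today h ih => rw [climbA, if_pos h]; exact ih
  | case2 today h => rw [climbA, if_neg h]; omega

theorem innerA_fst_ge (rd : List Int) (today : Int) (cur : Nat) :
    ∀ k i func, rd.length - i = k → func ≤ (innerA rd today cur i func).1 := by
  intro k
  induction k with
  | zero => intro i func hk; rw [innerA]; simp [show ¬ i < rd.length by omega]
  | succ k ih =>
    intro i func hk
    rw [innerA, if_pos (show i < rd.length by omega)]
    by_cases hle : rd.getD i 0 ≤ today
    · rw [if_pos hle]
      have := ih (i + 1) (func + 1) (by omega)
      omega
    · rw [if_neg hle]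

theorem innerA_start_gt (rd : List Int) (today : Int) (func : Nat)
    (h : func < rd.length) (hle : rd.getD func 0 ≤ today) :
    func < (innerA rd today func func func).1 := by
  rw [innerA, if_pos h, if_pos hle]
  have := innerA_fst_ge rd today func (rd.length - (func + 1)) (func + 1) (func + 1) rfl
  omega

theorem stepA_fst_gt (rd : List Int) (today : Int) (func : Nat) (answer : List Int)
    (h : func < rd.length) : func < (stepA rd today func answer).2.1 :=
  innerA_start_gt rd (climbA (rd.getD func 0) today) func h (climbA_ge (rd.getD func 0) today)

theorem loopA_exit (rd : List Int) (today : Int) (func : Nat) (ans : List Int)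
    (h : ¬ func < rd.length) : loopA rd today func ans = ans := by
  rw [loopA]; simp [h]

-- `today` climbs one day at a time up to the current leader's date: net effect is max.
theorem climbA_eq_max (r : Int) : ∀ k today, (r - today).toNat = k → climbA r today = max today r := by
  intro k
  induction k with
  | zero => intro today hk; rw [climbA, if_neg (by omega)]; omega
  | succ k ih =>
    intro today hk
    rw [climbA, if_pos (by omega), ih (today + 1) (by omega)]
    omega

-- Core correspondence: A's inner scan (and the continuation of the while loop)
-- equals B's pass over the remaining suffix, with B's count = i - cur.
theorem inner_corr (rd : List Int) :
    ∀ k i cur (T : Int) (ans : List Int), rd.length - i = k → cur ≤ i →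
      loopA rd T (innerA rd T cur i i).1
        (match (innerA rd T cur i i).2 with | none => ans | some x => ans ++ [x])
      = loopB ans (some T) ((i : Int) - (cur : Int)) (rd.drop i) := by
  intro k
  induction k with
  | zero =>
    intro i cur T ans hk hcur
    have h : ¬ i < rd.length := by omega
    rw [innerA, if_neg h]
    simp only
    rw [loopA_exit rd T i _ h, List.drop_of_length_le (by omega), loopB]
  | succ k ih =>
    intro i cur T ans hk hcur
    have h : i < rd.length := by omega
    have hdrop : rd.drop i = rd.getD i 0 :: rd.drop (i + 1) := by
      rw [List.getD_eq_getElem rd 0 h, List.drop_eq_getElem_cons h]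
    by_cases hle : rd.getD i 0 ≤ T
    · rw [innerA, if_pos h, if_pos hle]
      rw [ih (i + 1) cur T ans (by omega) (by omega), hdrop, loopB]
      rw [if_pos hle]
      congr 1
      push_cast
      ring
    · have hunf : innerA rd T cur i i = (i, some ((i : Int) - (cur : Int))) := by
        rw [innerA, if_pos h, if_neg hle]
      rw [hunf]
      simp only
      -- A appended i - cur and re-enters the while loop at func = i; today climbs to rd[i].
      rw [loopA, dif_pos h, dif_pos (stepA_fst_gt rd T i (ans ++ [(i : Int) - (cur : Int)]) h)]
      simp only [stepA]
      rw [climbA_eq_max (rd.getD i 0) _ T rfl,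
        max_eq_right (show T ≤ rd.getD i 0 by omega)]
      have hunf2 : innerA rd (rd.getD i 0) i i i = innerA rd (rd.getD i 0) i (i + 1) (i + 1) := by
        rw [innerA, if_pos h, if_pos (le_refl (rd.getD i 0))]
      simp only [hunf2]
      rw [ih (i + 1) i (rd.getD i 0) (ans ++ [(i : Int) - (cur : Int)]) (by omega) (by omega)]
      rw [hdrop, loopB]
      rw [if_neg hle]
      congr 1
      push_cast
      ring

theorem loop_corr (rd : List Int) : loopA rd 1 0 [] = loopB [] none 0 rd := by
  match rd with
  | [] => rw [loopA_exit _ _ _ _ (by simp), loopB]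
  | d :: rest =>
    have h0 : (0 : Nat) < (d :: rest).length := by simp
    have hd0 : (d :: rest).getD 0 0 = d := rfl
    rw [loopA, dif_pos h0, dif_pos (stepA_fst_gt (d :: rest) 1 0 [] h0)]
    simp only [stepA]
    rw [hd0, climbA_eq_max d _ 1 rfl]
    have hunf : innerA (d :: rest) (max 1 d) 0 0 0
        = innerA (d :: rest) (max 1 d) 0 1 1 := by
      rw [innerA, if_pos h0,
        if_pos (show (d :: rest).getD 0 0 ≤ max 1 d by rw [hd0]; omega)]
    simp only [hunf]
    have := inner_corr (d :: rest) rest.length 1 0 (max 1 d) [] (by simp) (by omega)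
    rw [this]
    simp [loopB]

-- ===== VERDICT (by name: the statement is the Claim_ definition above) =====
theorem solution_spec : Claim_equal_solution := by
  intro p s _ _
  unfold Spec_solution solution solution_alt
  exact loop_corr (releaseDate p s)
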